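-- pv_equiv track=rewrite | github.com/dvaumoron/fourreToutPython | src/codi.py | macro_square_matrix
-- ===== SOURCE A (Python) =====
-- def macro_square_matrix(size):
--     name = f"SquareMatrix{size}"
--     line_name = f"MatrixLine{size}"
--
--     str_body_buffer = ["'[['"]
--     id_list_buffer = []
--     generate_list_buffer = []
--     add_list_buffer = []
--     sub_list_buffer = []
--     mul_list_buffer = []
--     matmul_list_buffer = []
--
--     f_call = "f()"
--
--     range_size = range(size)
--     for i in range_size:
--         if i != 0:
--             str_body_buffer.append("'],\\n ['")
--         offset = i * size
--         matmul_sublist_buffer = []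
--         for j in range_size:
--             indice = j + offset
--             if j != 0:
--                 str_body_buffer.append("', '")
--             str_body_buffer.append(f"str(self_inner[{indice}])")
--             id_list_buffer.append("1" if i == j else "0")
--             generate_list_buffer.append(f_call)
--             add_list_buffer.append(f"self_inner[{indice}] + other_inner[{indice}]")
--             sub_list_buffer.append(f"self_inner[{indice}] - other_inner[{indice}]")
--             mul_list_buffer.append(f"other * self_inner[{indice}]")
--             matmul_sublist_buffer.append(f"self_inner[{indice}] * other[{j}]")
--         matmul_list_buffer.append(" + ".join(matmul_sublist_buffer))
--
--     str_body_buffer.append("']]'")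
--
--     lit_join = ", ".join
--
--     return f"""\
-- class {line_name}:
--     __slots__ = ('inner', 'offset')
--     def __init__(self, inner, line):
--         self.inner = inner
--         self.offset = line * {size}
--     def __getitem__(self, column):
--         return self.inner[column + self.offset]
--     def __setitem__(self, column, value):
--         self.inner[column + self.offset] = value
-- class {name}:
--     __slots__ = ('inner',)
--     def __init__(self, inner):
--         self.inner = inner
--     def __getitem__(self, line):
--         return {line_name}(self.inner, line)
--     def __repr__(self):
--         return '{name}({{}})'.format(self.inner)
--     def __str__(self):
--         self_inner = self.inner
--         return ''.join(({lit_join(str_body_buffer)},))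
--     @classmethod
--     def identity(klass):
--         return klass([{lit_join(id_list_buffer)}])
--     @classmethod
--     def generate(klass, f):
--         return klass([{lit_join(generate_list_buffer)}])
--     def __add__(self, other):
--         if isinstance(other, {name}):
--             self_inner = self.inner
--             other_inner = other.inner
--             return type(self)([{lit_join(add_list_buffer)}])
--         return NotImplemented
--     def __sub__(self, other):
--         if isinstance(other, {name}):
--             self_inner = self.inner
--             other_inner = other.inner
--             return type(self)([{lit_join(sub_list_buffer)}])
--         return NotImplemented
--     def __mul__(self, other):
--         self_inner = self.inner
--         return type(self)([{lit_join(mul_list_buffer)}])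
--     __rmul__ = __mul__
--     def __matmul__(self, other):
--         self_inner = self.inner
--         return [{lit_join(matmul_list_buffer)}]
-- """
-- ===== SOURCE B (Python) =====
-- def _rows(line, size):
--     """Rows of the flat cell-index-string table, one per line, built recursively."""
--     if line >= size:
--         return []
--     off = line * size
--     return [[str(k) for k in range(off, off + size)]] + _rows(line + 1, size)
--
--
-- def _template(line_name, name, size_str, str_s, id_s, gen_s, add_s, sub_s, mul_s, matmul_s):
--     return f"""\
-- class {line_name}:
--     __slots__ = ('inner', 'offset')
--     def __init__(self, inner, line):
--         self.inner = inner
--         self.offset = line * {size_str}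
--     def __getitem__(self, column):
--         return self.inner[column + self.offset]
--     def __setitem__(self, column, value):
--         self.inner[column + self.offset] = value
-- class {name}:
--     __slots__ = ('inner',)
--     def __init__(self, inner):
--         self.inner = inner
--     def __getitem__(self, line):
--         return {line_name}(self.inner, line)
--     def __repr__(self):
--         return '{name}({{}})'.format(self.inner)
--     def __str__(self):
--         self_inner = self.inner
--         return ''.join(({str_s},))
--     @classmethod
--     def identity(klass):
--         return klass([{id_s}])
--     @classmethod
--     def generate(klass, f):
--         return klass([{gen_s}])
--     def __add__(self, other):
--         if isinstance(other, {name}):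
--             self_inner = self.inner
--             other_inner = other.inner
--             return type(self)([{add_s}])
--         return NotImplemented
--     def __sub__(self, other):
--         if isinstance(other, {name}):
--             self_inner = self.inner
--             other_inner = other.inner
--             return type(self)([{sub_s}])
--         return NotImplemented
--     def __mul__(self, other):
--         self_inner = self.inner
--         return type(self)([{mul_s}])
--     __rmul__ = __mul__
--     def __matmul__(self, other):
--         self_inner = self.inner
--         return [{matmul_s}]
-- """
--
--
-- def macro_square_matrix(size):
--     # natural domain: size >= 0
--     name = f"SquareMatrix{size}"
--     line_name = f"MatrixLine{size}"
--
--     # the flat table of cell-index strings and its rows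
--     rows = _rows(0, size)
--     idx = [k for row in rows for k in row]
--
--     id_s = ", ".join(s for r in range(size)
--                      for s in ["0"] * r + ["1"] + ["0"] * (size - 1 - r))
--     gen_s = ", ".join(["f()"] * len(idx))
--     add_s = ", ".join(f"self_inner[{k}] + other_inner[{k}]" for k in idx)
--     sub_s = ", ".join(f"self_inner[{k}] - other_inner[{k}]" for k in idx)
--     mul_s = ", ".join(f"other * self_inner[{k}]" for k in idx)
--     matmul_s = ", ".join(" + ".join(f"self_inner[{k}] * other[{j}]"
--                                     for j, k in enumerate(row))
--                          for row in rows)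
--
--     cell_rows = [", ', ', ".join(f"str(self_inner[{k}])" for k in row) for row in rows]
--     if cell_rows:
--         str_s = "'[[', " + ", '],\\n [', ".join(cell_rows) + ", ']]'"
--     else:
--         str_s = "'[[', ']]'"
--
--     return _template(line_name, name, str(size), str_s, id_s, gen_s, add_s, sub_s,
--                      mul_s, matmul_s)
-- ===== Notes on version B (the rewrite author's own statement) =====
-- stated objective: alternative
-- what changed: A's fused nested i,j loop maintaining seven parallel buffers is replaced by a different decomposition over a different structure: a recursive row builder produces the table of flat cell-index strings, and every fragment is derived from that table (identity rows by list replication ['0']*r+['1']+['0']*(size-1-r) instead of a per-cell i==j test, generate by list multiplication over the table's length, matmul column indices recovered by enumerate).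
import Mathlib
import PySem

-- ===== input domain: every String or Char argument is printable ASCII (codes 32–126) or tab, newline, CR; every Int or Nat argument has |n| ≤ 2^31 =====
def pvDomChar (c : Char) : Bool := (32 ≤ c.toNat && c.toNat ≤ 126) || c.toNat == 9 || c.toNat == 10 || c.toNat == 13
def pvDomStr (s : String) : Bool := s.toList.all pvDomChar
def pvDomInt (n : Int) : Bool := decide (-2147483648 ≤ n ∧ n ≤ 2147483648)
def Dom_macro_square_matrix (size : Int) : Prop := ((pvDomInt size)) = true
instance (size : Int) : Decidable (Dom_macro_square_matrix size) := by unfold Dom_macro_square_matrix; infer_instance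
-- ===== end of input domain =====

-- B replaces A's fused nested loop with seven parallel buffers by a flat table of cell-index
-- strings recursively chunked into rows, identity rows by list replication (objective: alternative).

-- the output source-code template: the f-string literal, byte-identical in both Pythons,
-- factored out as a shared helper with the interpolated fragments as parameters
def pvTemplate (lineName name sizeStr strS idS genS addS subS mulS matS : String) : String :=
  "class " ++ lineName ++ ":\n    __slots__ = ('inner', 'offset')\n    def __init__(self, inner, line):\n        self.inner = inner\n        self.offset = line * " ++ sizeStr ++ "\n    def __getitem__(self, column):\n        return self.inner[column + self.offset]\n    def __setitem__(self, column, value):\n        self.inner[column + self.offset] = value\nclass " ++ name ++ ":\n    __slots__ = ('inner',)\n    def __init__(self, inner):\n        self.inner = inner\n    def __getitem__(self, line):\n        return " ++ lineName ++ "(self.inner, line)\n    def __repr__(self):\n        return '" ++ name ++ "({})'.format(self.inner)\n    def __str__(self):\n        self_inner = self.inner\n        return ''.join((" ++ strS ++ ",))\n    @classmethod\n    def identity(klass):\n        return klass([" ++ idS ++ "])\n    @classmethod\n    def generate(klass, f):\n        return klass([" ++ genS ++ "])\n    def __add__(self, other):\n        if isinstance(other, " ++ name ++ "):\n            self_inner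 = self.inner\n            other_inner = other.inner\n            return type(self)([" ++ addS ++ "])\n        return NotImplemented\n    def __sub__(self, other):\n        if isinstance(other, " ++ name ++ "):\n            self_inner = self.inner\n            other_inner = other.inner\n            return type(self)([" ++ subS ++ "])\n        return NotImplemented\n    def __mul__(self, other):\n        self_inner = self.inner\n        return type(self)([" ++ mulS ++ "])\n    __rmul__ = __mul__\n    def __matmul__(self, other):\n        self_inner = self.inner\n        return [" ++ matS ++ "]\n"

-- ===== PORT A =====
-- state: (str_body, id_list, generate_list, add_list, sub_list, mul_list, matmul_sublist/list)
def aInnerBody (size i : Int)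
    (p : List String × List String × List String × List String × List String × List String × List String)
    (j : Int) :
    List String × List String × List String × List String × List String × List String × List String :=
  let (strB, idL, genL, addL, subL, mulL, matSub) := p
  let indice := j + i * size
  let strB := if j ≠ 0 then "', '" :: strB else strB
  (("str(self_inner[" ++ PySem.Int.toStr indice ++ "])") :: strB,
   (if i = j then "1" else "0") :: idL,
   "f()" :: genL,
   ("self_inner[" ++ PySem.Int.toStr indice ++ "] + other_inner[" ++ PySem.Int.toStr indice ++ "]") :: addL,
   ("self_inner[" ++ PySem.Int.toStr indice ++ "] - other_inner[" ++ PySem.Int.toStr indice ++ "]") :: subL,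
   ("other * self_inner[" ++ PySem.Int.toStr indice ++ "]") :: mulL,
   ("self_inner[" ++ PySem.Int.toStr indice ++ "] * other[" ++ PySem.Int.toStr j ++ "]") :: matSub)

def aOuterBody (size : Int)
    (st : List String × List String × List String × List String × List String × List String × List String)
    (i : Int) :
    List String × List String × List String × List String × List String × List String × List String :=
  let (strB, idL, genL, addL, subL, mulL, matL) := st
  let strB := if i ≠ 0 then "'],\\n ['" :: strB else strB
  let inner := (PySem.List.pyRange 0 size 1).foldl (aInnerBody size i)
      (strB, idL, genL, addL, subL, mulL, [])
  let (strB2, idL2, genL2, addL2, subL2, mulL2, matSub) := inner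
  (strB2, idL2, genL2, addL2, subL2, mulL2,
   PySem.Str.join " + " matSub.reverse :: matL)

def macro_square_matrix (size : Int) : String :=
  let name := "SquareMatrix" ++ PySem.Int.toStr size
  let line_name := "MatrixLine" ++ PySem.Int.toStr size
  let st := (PySem.List.pyRange 0 size 1).foldl (aOuterBody size)
      (["'[['"], [], [], [], [], [], [])
  let (strB, idL, genL, addL, subL, mulL, matL) := st
  let strB := "']]'" :: strB
  pvTemplate line_name name (PySem.Int.toStr size)
    (PySem.Str.join ", " strB.reverse) (PySem.Str.join ", " idL.reverse)
    (PySem.Str.join ", " genL.reverse) (PySem.Str.join ", " addL.reverse)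
    (PySem.Str.join ", " subL.reverse) (PySem.Str.join ", " mulL.reverse)
    (PySem.Str.join ", " matL.reverse)
-- ===== PORT B =====
-- port of Source B's _rows: recursive builder of the rows of the cell-index-string table
def pvRowsF (line size : Int) : List (List String) :=
  if line ≥ size then []
  else ((PySem.List.pyRange (line * size) (line * size + size) 1).map PySem.Int.toStr) ::
    pvRowsF (line + 1) size
  termination_by (size - line).toNat
  decreasing_by omega

def macro_square_matrix_alt (size : Int) : String :=
  let name := "SquareMatrix" ++ PySem.Int.toStr size
  let line_name := "MatrixLine" ++ PySem.Int.toStr size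
  let rows := pvRowsF 0 size
  let idx := rows.flatMap (fun row => row)
  let id_s := PySem.Str.join ", " ((PySem.List.pyRange 0 size 1).flatMap (fun r =>
      List.replicate r.toNat "0" ++ ["1"] ++ List.replicate (size - 1 - r).toNat "0"))
  let gen_s := PySem.Str.join ", " (List.replicate idx.length "f()")
  let add_s := PySem.Str.join ", " (idx.map (fun k =>
      "self_inner[" ++ k ++ "] + other_inner[" ++ k ++ "]"))
  let sub_s := PySem.Str.join ", " (idx.map (fun k =>
      "self_inner[" ++ k ++ "] - other_inner[" ++ k ++ "]"))
  let mul_s := PySem.Str.join ", " (idx.map (fun k => "other * self_inner[" ++ k ++ "]"))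
  let matmul_s := PySem.Str.join ", " (rows.map (fun row =>
      PySem.Str.join " + " ((PySem.List.enumerate row 0).map (fun p =>
        "self_inner[" ++ p.2 ++ "] * other[" ++ PySem.Int.toStr p.1 ++ "]"))))
  let cell_rows := rows.map (fun row =>
      PySem.Str.join ", ', ', " (row.map (fun k => "str(self_inner[" ++ k ++ "])")))
  let str_s := if cell_rows.isEmpty then "'[[', ']]'"
               else "'[[', " ++ PySem.Str.join ", '],\\n [', " cell_rows ++ ", ']]'"
  pvTemplate line_name name (PySem.Int.toStr size)
    str_s id_s gen_s add_s sub_s mul_s matmul_s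

-- ===== PRECONDITION & SPEC =====
-- (no Pre_: A is total, and B agrees with it on every size, negative sizes included)
def Spec_macro_square_matrix (size : Int) (out : String) : Prop := out = macro_square_matrix_alt size
instance (size : Int) (out : String) : Decidable (Spec_macro_square_matrix size out) := by unfold Spec_macro_square_matrix; infer_instance

-- ===== CLAIM (what is proved, stated in full; the proofs are below) =====
def Claim_equal_macro_square_matrix : Prop := ∀ (size : Int), Dom_macro_square_matrix size → Spec_macro_square_matrix size (macro_square_matrix size)


-- ===== LEMMAS AND PROOFS =====

-- closed form of A's inner loop: the fused fold is seven independent list builders (reversed)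
theorem aInner_eq (size i : Int) (l : List Int) (b1 b2 b3 b4 b5 b6 b7 : List String) :
    l.foldl (aInnerBody size i) (b1, b2, b3, b4, b5, b6, b7) =
    ((l.flatMap (fun j => (if j ≠ 0 then ["', '"] else []) ++
        ["str(self_inner[" ++ PySem.Int.toStr (j + i * size) ++ "])"])).reverse ++ b1,
     (l.map (fun j => if i = j then "1" else "0")).reverse ++ b2,
     (l.map (fun _ => "f()")).reverse ++ b3,
     (l.map (fun j => "self_inner[" ++ PySem.Int.toStr (j + i * size) ++ "] + other_inner[" ++ PySem.Int.toStr (j + i * size) ++ "]")).reverse ++ b4,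
     (l.map (fun j => "self_inner[" ++ PySem.Int.toStr (j + i * size) ++ "] - other_inner[" ++ PySem.Int.toStr (j + i * size) ++ "]")).reverse ++ b5,
     (l.map (fun j => "other * self_inner[" ++ PySem.Int.toStr (j + i * size) ++ "]")).reverse ++ b6,
     (l.map (fun j => "self_inner[" ++ PySem.Int.toStr (j + i * size) ++ "] * other[" ++ PySem.Int.toStr j ++ "]")).reverse ++ b7) := by
  induction l generalizing b1 b2 b3 b4 b5 b6 b7 with
  | nil => simp
  | cons j t ih =>
    simp only [List.foldl_cons, aInnerBody]
    rw [ih]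
    by_cases hj : j = 0 <;> simp [hj, List.append_assoc]

-- closed form of A's outer loop (buffers reversed; matmul rows in order after the re-reverse)
theorem aOuter_eq (size : Int) (l : List Int) (b1 b2 b3 b4 b5 b6 b7 : List String) :
    l.foldl (aOuterBody size) (b1, b2, b3, b4, b5, b6, b7) =
    ((l.flatMap (fun i => (if i ≠ 0 then ["'],\\n ['"] else []) ++
        (PySem.List.pyRange 0 size 1).flatMap (fun j => (if j ≠ 0 then ["', '"] else []) ++
          ["str(self_inner[" ++ PySem.Int.toStr (j + i * size) ++ "])"]))).reverse ++ b1,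
     (l.flatMap (fun i => (PySem.List.pyRange 0 size 1).map (fun j => if i = j then "1" else "0"))).reverse ++ b2,
     (l.flatMap (fun _ => (PySem.List.pyRange 0 size 1).map (fun _ => "f()"))).reverse ++ b3,
     (l.flatMap (fun i => (PySem.List.pyRange 0 size 1).map (fun j => "self_inner[" ++ PySem.Int.toStr (j + i * size) ++ "] + other_inner[" ++ PySem.Int.toStr (j + i * size) ++ "]"))).reverse ++ b4,
     (l.flatMap (fun i => (PySem.List.pyRange 0 size 1).map (fun j => "self_inner[" ++ PySem.Int.toStr (j + i * size) ++ "] - other_inner[" ++ PySem.Int.toStr (j + i * size) ++ "]"))).reverse ++ b5,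
     (l.flatMap (fun i => (PySem.List.pyRange 0 size 1).map (fun j => "other * self_inner[" ++ PySem.Int.toStr (j + i * size) ++ "]"))).reverse ++ b6,
     (l.map (fun i => PySem.Str.join " + " ((PySem.List.pyRange 0 size 1).map (fun j => "self_inner[" ++ PySem.Int.toStr (j + i * size) ++ "] * other[" ++ PySem.Int.toStr j ++ "]")))).reverse ++ b7) := by
  induction l generalizing b1 b2 b3 b4 b5 b6 b7 with
  | nil => simp
  | cons i t ih =>
    simp only [List.foldl_cons, aOuterBody]
    rw [aInner_eq, ih]
    by_cases hi : i = 0 <;>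
      simp [hi, List.reverse_append, List.reverse_reverse, List.append_assoc]

-- a constant map is a replicate
theorem pvMapConst {α : Type} (l : List α) (c : String) :
    l.map (fun _ => c) = List.replicate l.length c := by
  induction l with
  | nil => rfl
  | cons x t ih => simp [ih, List.replicate_succ]

-- shifting a range
theorem pvRangeShift (a s : Int) :
    PySem.List.pyRange a (a + s) 1 = (PySem.List.pyRange 0 s 1).map (fun j => j + a) := by
  rw [PySem.List.pyRange_one, PySem.List.pyRange_one]
  have h : a + s - a = s - 0 := by ring
  rw [h, List.map_map]
  exact List.map_congr_left (fun k _ => by simp [Function.comp]; omega)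

-- range(size*size) is the grid of rows: flat index k = j + i*size
theorem pvGridAux (n : Nat) (s : Int) (hs : 0 ≤ s) :
    PySem.List.pyRange 0 ((n : Int) * s) 1 =
    (PySem.List.pyRange 0 (n : Int) 1).flatMap (fun i =>
      (PySem.List.pyRange 0 s 1).map (fun j => j + i * s)) := by
  induction n with
  | zero =>
    have h : PySem.List.pyRange 0 0 1 = [] := PySem.List.pyRange_one_eq_nil (le_refl 0)
    simp [h]
  | succ n ih =>
    have h1 : ((n + 1 : Nat) : Int) * s = (n : Int) * s + s := by push_cast; ring
    have h0 : (0 : Int) ≤ (n : Int) * s := by positivity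
    have h2 : PySem.List.pyRange 0 ((n:Int) * s + s) 1 =
        PySem.List.pyRange 0 ((n:Int) * s) 1 ++ PySem.List.pyRange ((n:Int) * s) ((n:Int) * s + s) 1 :=
      PySem.List.pyRange_one_append 0 ((n:Int) * s) ((n:Int) * s + s) h0 (by omega)
    have h3 : ((n + 1 : Nat) : Int) = (n : Int) + 1 := by push_cast; ring
    rw [h1, h2, h3, PySem.List.pyRange_one_succ_right (by positivity : (0:Int) ≤ (n:Int)), ih,
        pvRangeShift ((n:Int) * s) s]
    simp [List.flatMap_append]

theorem pvGrid (s : Int) (hs : 0 ≤ s) :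
    PySem.List.pyRange 0 (s * s) 1 =
    (PySem.List.pyRange 0 s 1).flatMap (fun i =>
      (PySem.List.pyRange 0 s 1).map (fun j => j + i * s)) := by
  have := pvGridAux s.toNat s hs
  rwa [Int.toNat_of_nonneg hs] at this

-- the recursive row builder, from line i on, is the per-row map over the remaining range
theorem pvRowsF_eq_aux (s : Int) (n : Nat) :
    ∀ (i : Int), i = s - (n : Int) → 0 ≤ i →
    pvRowsF i s = (PySem.List.pyRange i s 1).map (fun r =>
      (PySem.List.pyRange 0 s 1).map (fun j => PySem.Int.toStr (j + r * s))) := by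
  induction n with
  | zero =>
    intro i hi _
    have hi' : i = s := by omega
    rw [hi', pvRowsF, if_pos (le_refl s),
        PySem.List.pyRange_one_eq_nil (le_refl s), List.map_nil]
  | succ n ih =>
    intro i hi h0
    have his : i < s := by omega
    rw [pvRowsF, if_neg (by omega)]
    rw [pvRangeShift (i * s) s, List.map_map, ih (i + 1) (by omega) (by omega),
        PySem.List.pyRange_one_cons his, List.map_cons]
    rfl

theorem pvRowsF_eq (s : Int) (hs : 0 < s) :
    pvRowsF 0 s = (PySem.List.pyRange 0 s 1).map (fun r =>
      (PySem.List.pyRange 0 s 1).map (fun j => PySem.Int.toStr (j + r * s))) := by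
  have h := pvRowsF_eq_aux s s.toNat 0 (by omega) (le_refl 0)
  simpa using h

-- an identity row: the 0/1 comparison row is replication around the diagonal
theorem pvIdRow (s i : Int) (h0 : 0 ≤ i) (his : i < s) :
    (PySem.List.pyRange 0 s 1).map (fun j => if i = j then "1" else "0") =
    List.replicate i.toNat "0" ++ ["1"] ++ List.replicate (s - 1 - i).toNat "0" := by
  have hsplit1 : PySem.List.pyRange 0 s 1 =
      PySem.List.pyRange 0 i 1 ++ PySem.List.pyRange i s 1 :=
    PySem.List.pyRange_one_append 0 i s h0 (by omega)
  have hsplit2 : PySem.List.pyRange i s 1 =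
      PySem.List.pyRange i (i+1) 1 ++ PySem.List.pyRange (i+1) s 1 :=
    PySem.List.pyRange_one_append i (i+1) s (by omega) (by omega)
  rw [hsplit1, hsplit2, PySem.List.pyRange_one_singleton, List.map_append, List.map_append]
  have c1 : (PySem.List.pyRange 0 i 1).map (fun j => if i = j then "1" else "0") =
      (PySem.List.pyRange 0 i 1).map (fun _ => "0") :=
    List.map_congr_left (fun j hj => by
      rw [PySem.List.mem_pyRange_one] at hj
      exact if_neg (by omega))
  have c2 : (PySem.List.pyRange (i+1) s 1).map (fun j => if i = j then "1" else "0") =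
      (PySem.List.pyRange (i+1) s 1).map (fun _ => "0") :=
    List.map_congr_left (fun j hj => by
      rw [PySem.List.mem_pyRange_one] at hj
      exact if_neg (by omega))
  rw [c1, c2, pvMapConst, pvMapConst, PySem.List.length_pyRange_one,
      PySem.List.length_pyRange_one]
  have e1 : (i - 0).toNat = i.toNat := by omega
  have e2 : (s - (i + 1)).toNat = (s - 1 - i).toNat := by omega
  rw [e1, e2]
  simp [List.append_assoc]

-- enumerate over a map pushes into the pairs
theorem pvEnumMap {α β : Type} (l : List α) (s : Int) (f : α → β) :
    PySem.List.enumerate (l.map f) s = (PySem.List.enumerate l s).map (fun p => (p.1, f p.2)) := by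
  induction l generalizing s with
  | nil => simp [PySem.List.enumerate_nil]
  | cons x t ih => simp [PySem.List.enumerate_cons, ih]

-- enumerating a range starting at its base pairs each element with itself
theorem pvEnumRangeAux (n : Nat) (a : Int) :
    PySem.List.enumerate (PySem.List.pyRange a (a + (n : Int)) 1) a =
    (PySem.List.pyRange a (a + (n : Int)) 1).map (fun j => (j, j)) := by
  induction n with
  | zero =>
    have h : PySem.List.pyRange a (a + ((0:Nat):Int)) 1 = [] :=
      PySem.List.pyRange_one_eq_nil (by omega)
    rw [h]
    simp [PySem.List.enumerate_nil]
  | succ n ih =>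
    have h1 : a + ((n + 1 : Nat) : Int) = (a + (n : Int)) + 1 := by push_cast; ring
    rw [h1, PySem.List.pyRange_one_succ_right (by omega : a ≤ a + (n:Int)),
        PySem.List.enumerate_append, ih, PySem.List.length_pyRange_one]
    have h2 : a + (↑(a + (n:Int) - a).toNat : Int) = a + (n : Int) := by
      congr 1
      omega
    rw [h2]
    simp [PySem.List.enumerate_cons, PySem.List.enumerate_nil]

theorem pvEnumRange0 (s : Int) (hs : 0 ≤ s) :
    PySem.List.enumerate (PySem.List.pyRange 0 s 1) 0 =
    (PySem.List.pyRange 0 s 1).map (fun j => (j, j)) := by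
  have := pvEnumRangeAux s.toNat 0
  rwa [zero_add, Int.toNat_of_nonneg hs] at this

-- join over a cons with a nonempty tail, String-independent (Chars level)
theorem cjoin_cons_ne (sep p : List Char) (l : List (List Char)) (h : l ≠ []) :
    PySem.Chars.join sep (p :: l) = p ++ sep ++ PySem.Chars.join sep l := by
  cases l with
  | nil => exact absurd rfl h
  | cons q rest => exact PySem.Chars.join_cons_cons sep p q rest

theorem cjoin_append (sep : List Char) (xs ys : List (List Char)) (hx : xs ≠ []) (hy : ys ≠ []) :
    PySem.Chars.join sep (xs ++ ys) = PySem.Chars.join sep xs ++ sep ++ PySem.Chars.join sep ys := by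
  induction xs with
  | nil => exact absurd rfl hx
  | cons p xs ih =>
    cases xs with
    | nil => simp [PySem.Chars.join_singleton, cjoin_cons_ne sep p ys hy]
    | cons q rest =>
      rw [List.cons_append, cjoin_cons_ne sep p ((q :: rest) ++ ys) (by simp),
          cjoin_cons_ne sep p (q :: rest) (by simp), ih (by simp)]
      simp [List.append_assoc]

-- joining blocks separated by a one-token separator q equals joining the per-block joins
-- with the composite separator sep ++ q ++ sep
theorem cjoin_blocks (sep q : List Char) (T : Int → List (List Char)) (l : List Int)
    (t0 : List (List Char)) (h0 : t0 ≠ []) (hT : ∀ i ∈ l, T i ≠ []) :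
    PySem.Chars.join sep (t0 ++ l.flatMap (fun i => q :: T i)) =
    PySem.Chars.join (sep ++ q ++ sep)
      (PySem.Chars.join sep t0 :: l.map (fun i => PySem.Chars.join sep (T i))) := by
  induction l generalizing t0 with
  | nil => simp [PySem.Chars.join_singleton]
  | cons i t ih =>
    have hTi : T i ≠ [] := hT i (List.mem_cons_self ..)
    have h1 : t0 ++ (i :: t).flatMap (fun i => q :: T i) =
        (t0 ++ [q]) ++ (T i ++ t.flatMap (fun i => q :: T i)) := by
      simp [List.flatMap_cons, List.append_assoc]
    rw [h1, cjoin_append sep (t0 ++ [q]) _ (by simp) (by simp [hTi]),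
        cjoin_append sep t0 [q] h0 (by simp), PySem.Chars.join_singleton,
        ih (T i) hTi (fun x hx => hT x (List.mem_cons_of_mem _ hx)),
        List.map_cons, PySem.Chars.join_cons_cons]
    simp [List.append_assoc]

-- the whole __str__ fragment, proved once at the Chars level over abstract cell strings
theorem str_frag (sep q r t0 tE : List Char) (c : Int → Int → List Char) (l : List Int) :
    PySem.Chars.join sep ([t0] ++
      ((c 0 0 :: l.flatMap (fun j => [q, c 0 j])) ++
        l.flatMap (fun i => r :: (c i 0 :: l.flatMap (fun j => [q, c i j])))) ++ [tE]) =
    t0 ++ sep ++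
      PySem.Chars.join (sep ++ r ++ sep)
        ((0 :: l).map (fun i => PySem.Chars.join (sep ++ q ++ sep) ((0 :: l).map (c i)))) ++
      sep ++ tE := by
  have hrow : ∀ i : Int,
      PySem.Chars.join sep (c i 0 :: l.flatMap (fun j => [q, c i j])) =
      PySem.Chars.join (sep ++ q ++ sep) ((0 :: l).map (c i)) := by
    intro i
    have h := cjoin_blocks sep q (fun j => [c i j]) l [c i 0] (by simp) (by simp)
    simpa [PySem.Chars.join_singleton] using h
  have hmid := cjoin_blocks sep r (fun i => c i 0 :: l.flatMap (fun j => [q, c i j])) l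
      (c 0 0 :: l.flatMap (fun j => [q, c 0 j])) (by simp) (by simp)
  have h1 : [t0] ++
      ((c 0 0 :: l.flatMap (fun j => [q, c 0 j])) ++
        l.flatMap (fun i => r :: (c i 0 :: l.flatMap (fun j => [q, c i j])))) ++ [tE] =
      [t0] ++ (((c 0 0 :: l.flatMap (fun j => [q, c 0 j])) ++
        l.flatMap (fun i => r :: (c i 0 :: l.flatMap (fun j => [q, c i j])))) ++ [tE]) := by
    simp [List.append_assoc]
  rw [h1, cjoin_append sep [t0] _ (by simp) (by simp),
      cjoin_append sep _ [tE] (by simp) (by simp),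
      PySem.Chars.join_singleton, hmid, List.map_cons, hrow 0,
      List.map_congr_left (fun i _ => hrow i)]
  simp [List.append_assoc]


-- the flat cell map is A's nested flatMap of maps (grid split)
theorem pvFlatCells (s : Int) (hs : 0 ≤ s) (g : Int → String) :
    (PySem.List.pyRange 0 (s * s) 1).map g =
    (PySem.List.pyRange 0 s 1).flatMap (fun i =>
      (PySem.List.pyRange 0 s 1).map (fun j => g (j + i * s))) := by
  rw [pvGrid s hs, List.map_flatMap]
  simp [List.map_map, Function.comp_def]

-- the flattened rows are the flat table of cell-index strings
theorem pvIdx (s : Int) (hs : 0 < s) :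
    ((PySem.List.pyRange 0 s 1).map (fun r =>
      (PySem.List.pyRange 0 s 1).map (fun j => PySem.Int.toStr (j + r * s)))).flatMap
        (fun row => row) =
    (PySem.List.pyRange 0 (s * s) 1).map PySem.Int.toStr := by
  rw [pvGrid s (le_of_lt hs), List.map_flatMap, List.flatMap_def, List.flatMap_def]
  simp [List.map_map, Function.comp_def]

theorem pv_main (size : Int) :
    macro_square_matrix size = macro_square_matrix_alt size := by
  by_cases hpos : 0 < size
  case neg =>
    -- size ≤ 0: every range is empty and the row builder stops at once
    simp only [macro_square_matrix, macro_square_matrix_alt]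
    have hR : PySem.List.pyRange 0 size 1 = [] := PySem.List.pyRange_one_eq_nil (by omega)
    rw [hR, show pvRowsF 0 size = [] from by rw [pvRowsF, if_pos (by omega)]]
    have h2 : PySem.Str.join ", " ["'[['", "']]'"] = "'[[', ']]'" := by decide
    simp [h2]
  case pos =>
    have hs : (0:Int) ≤ size := le_of_lt hpos
    simp only [macro_square_matrix, macro_square_matrix_alt]
    rw [aOuter_eq]
    simp only [List.append_nil, List.reverse_cons, List.reverse_append, List.reverse_reverse,
      List.reverse_nil, List.nil_append, List.singleton_append, List.append_assoc]
    rw [pvRowsF_eq size hpos, pvIdx size hpos]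
    -- the identity fragment: replication rows are the 0/1 comparison rows
    have hid : (PySem.List.pyRange 0 size 1).flatMap (fun r =>
          List.replicate r.toNat "0" ++ "1" :: List.replicate (size - 1 - r).toNat "0") =
        (PySem.List.pyRange 0 size 1).flatMap (fun i =>
          (PySem.List.pyRange 0 size 1).map (fun j => if i = j then "1" else "0")) :=
      List.flatMap_congr (fun i hi => by
        rw [PySem.List.mem_pyRange_one] at hi
        simpa [List.append_assoc] using (pvIdRow size i hi.1 hi.2).symm)
    -- the generate fragment
    have hlen : ((PySem.List.pyRange 0 (size * size) 1).map PySem.Int.toStr).length =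
        (size * size).toNat := by
      rw [List.length_map, PySem.List.length_pyRange_one]
      omega
    rw [hlen]
    have hgen : List.replicate (size * size).toNat "f()" =
        (PySem.List.pyRange 0 size 1).flatMap (fun _ =>
          (PySem.List.pyRange 0 size 1).map (fun _ => "f()")) := by
      have h := pvFlatCells size hs (fun _ => "f()")
      rw [pvMapConst, PySem.List.length_pyRange_one] at h
      have e : (size * size - 0).toNat = (size * size).toNat := by omega
      rwa [e] at h
    -- the add/sub/mul fragments
    have hadd : ((PySem.List.pyRange 0 (size * size) 1).map PySem.Int.toStr).map (fun k =>
          "self_inner[" ++ k ++ "] + other_inner[" ++ k ++ "]") =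
        (PySem.List.pyRange 0 size 1).flatMap (fun i =>
          (PySem.List.pyRange 0 size 1).map (fun j =>
            "self_inner[" ++ PySem.Int.toStr (j + i * size) ++ "] + other_inner[" ++ PySem.Int.toStr (j + i * size) ++ "]")) := by
      rw [List.map_map]
      exact pvFlatCells size hs _
    have hsub : ((PySem.List.pyRange 0 (size * size) 1).map PySem.Int.toStr).map (fun k =>
          "self_inner[" ++ k ++ "] - other_inner[" ++ k ++ "]") =
        (PySem.List.pyRange 0 size 1).flatMap (fun i =>
          (PySem.List.pyRange 0 size 1).map (fun j =>
            "self_inner[" ++ PySem.Int.toStr (j + i * size) ++ "] - other_inner[" ++ PySem.Int.toStr (j + i * size) ++ "]")) := by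
      rw [List.map_map]
      exact pvFlatCells size hs _
    have hmul : ((PySem.List.pyRange 0 (size * size) 1).map PySem.Int.toStr).map (fun k =>
          "other * self_inner[" ++ k ++ "]") =
        (PySem.List.pyRange 0 size 1).flatMap (fun i =>
          (PySem.List.pyRange 0 size 1).map (fun j =>
            "other * self_inner[" ++ PySem.Int.toStr (j + i * size) ++ "]")) := by
      rw [List.map_map]
      exact pvFlatCells size hs _
    -- the matmul fragment: enumerate recovers the column index
    have hmat : ((PySem.List.pyRange 0 size 1).map (fun i =>
          (PySem.List.pyRange 0 size 1).map (fun j => PySem.Int.toStr (j + i * size)))).map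
            (fun row => PySem.Str.join " + " ((PySem.List.enumerate row 0).map (fun p =>
              "self_inner[" ++ p.2 ++ "] * other[" ++ PySem.Int.toStr p.1 ++ "]"))) =
        (PySem.List.pyRange 0 size 1).map (fun i => PySem.Str.join " + "
          ((PySem.List.pyRange 0 size 1).map (fun j =>
            "self_inner[" ++ PySem.Int.toStr (j + i * size) ++ "] * other[" ++ PySem.Int.toStr j ++ "]"))) := by
      rw [List.map_map]
      exact List.map_congr_left (fun i _ => by
        simp only [pvEnumMap, pvEnumRange0 size hs, List.map_map, Function.comp_def])
    -- the __str__ cell rows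
    have hcell : ((PySem.List.pyRange 0 size 1).map (fun i =>
          (PySem.List.pyRange 0 size 1).map (fun j => PySem.Int.toStr (j + i * size)))).map
            (fun row => PySem.Str.join ", ', ', " (row.map (fun k =>
              "str(self_inner[" ++ k ++ "])"))) =
        (PySem.List.pyRange 0 size 1).map (fun i => PySem.Str.join ", ', ', "
          ((PySem.List.pyRange 0 size 1).map (fun j =>
            "str(self_inner[" ++ PySem.Int.toStr (j + i * size) ++ "])"))) := by
      rw [List.map_map]
      exact List.map_congr_left (fun i _ => by simp only [List.map_map, Function.comp_def])
    rw [hid, hgen, hadd, hsub, hmul, hmat, hcell]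
    congr 1
    -- the remaining goal: the __str__ fragment
    have hR : PySem.List.pyRange 0 size 1 = 0 :: PySem.List.pyRange 1 size 1 := by
      simpa using PySem.List.pyRange_one_cons (a := 0) (b := size) hpos
    have hne : ∀ i ∈ PySem.List.pyRange 1 size 1, i ≠ 0 := by
      intro i hi
      rw [PySem.List.mem_pyRange_one] at hi
      omega
    rw [hR]
    have hinner : ∀ i : Int,
        List.flatMap (fun j => (if j ≠ 0 then ["', '"] else []) ++
            ["str(self_inner[" ++ PySem.Int.toStr (j + i * size) ++ "])"])
          (0 :: PySem.List.pyRange 1 size 1) =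
        ("str(self_inner[" ++ PySem.Int.toStr (0 + i * size) ++ "])") ::
          (PySem.List.pyRange 1 size 1).flatMap (fun j =>
            ["', '", "str(self_inner[" ++ PySem.Int.toStr (j + i * size) ++ "])"]) := by
      intro i
      rw [List.flatMap_cons,
          List.flatMap_congr (fun j hj => by simp [hne j hj] :
            ∀ j ∈ PySem.List.pyRange 1 size 1,
              ((if j ≠ 0 then ["', '"] else []) ++
                ["str(self_inner[" ++ PySem.Int.toStr (j + i * size) ++ "])"]) =
              ["', '", "str(self_inner[" ++ PySem.Int.toStr (j + i * size) ++ "])"])]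
      simp
    have houter :
        List.flatMap (fun i => (if i ≠ 0 then ["'],\\n ['"] else []) ++
            List.flatMap (fun j => (if j ≠ 0 then ["', '"] else []) ++
              ["str(self_inner[" ++ PySem.Int.toStr (j + i * size) ++ "])"])
              (0 :: PySem.List.pyRange 1 size 1))
          (0 :: PySem.List.pyRange 1 size 1) =
        (("str(self_inner[" ++ PySem.Int.toStr (0 + 0 * size) ++ "])") ::
          (PySem.List.pyRange 1 size 1).flatMap (fun j =>
            ["', '", "str(self_inner[" ++ PySem.Int.toStr (j + 0 * size) ++ "])"])) ++
        (PySem.List.pyRange 1 size 1).flatMap (fun i =>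
          "'],\\n ['" :: (("str(self_inner[" ++ PySem.Int.toStr (0 + i * size) ++ "])") ::
            (PySem.List.pyRange 1 size 1).flatMap (fun j =>
              ["', '", "str(self_inner[" ++ PySem.Int.toStr (j + i * size) ++ "])"]))) := by
      rw [List.flatMap_cons,
          List.flatMap_congr (fun i hi => by rw [hinner i]; simp [hne i hi] :
            ∀ i ∈ PySem.List.pyRange 1 size 1,
              ((if i ≠ 0 then ["'],\\n ['"] else []) ++
                List.flatMap (fun j => (if j ≠ 0 then ["', '"] else []) ++
                  ["str(self_inner[" ++ PySem.Int.toStr (j + i * size) ++ "])"])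
                  (0 :: PySem.List.pyRange 1 size 1)) =
              "'],\\n ['" :: (("str(self_inner[" ++ PySem.Int.toStr (0 + i * size) ++ "])") ::
                (PySem.List.pyRange 1 size 1).flatMap (fun j =>
                  ["', '", "str(self_inner[" ++ PySem.Int.toStr (j + i * size) ++ "])"])))]
      rw [hinner 0]
      simp
    rw [houter, if_neg (by simp)]
    refine String.toList_inj.mp ?_
    have hq : (", " : String).toList ++ ("', '" : String).toList ++ (", " : String).toList =
        (", ', ', " : String).toList := by decide
    have hr : (", " : String).toList ++ ("'],\\n ['" : String).toList ++ (", " : String).toList =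
        (", '],\\n [', " : String).toList := by decide
    have hcap1 : ("'[[', " : String).toList = ("'[['" : String).toList ++ (", " : String).toList := by decide
    have hcap2 : (", ']]'" : String).toList = (", " : String).toList ++ ("']]'" : String).toList := by decide
    have h := str_frag (", " : String).toList ("', '" : String).toList ("'],\\n ['" : String).toList
        ("'[['" : String).toList ("']]'" : String).toList
        (fun i j => ("str(self_inner[" ++ PySem.Int.toStr (j + i * size) ++ "])" : String).toList)
        (PySem.List.pyRange 1 size 1)
    rw [hq, hr] at h
    simpa only [hcap1, hcap2, PySem.Str.toList_join, String.toList_append, List.map_flatMap,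
      List.map_map, List.map_cons, List.map_nil, List.map_append, List.append_assoc,
      Function.comp_def, List.cons_append, List.nil_append] using h

-- ===== VERDICT (by name: the statement is the Claim_ definition above) =====
theorem macro_square_matrix_spec : Claim_equal_macro_square_matrix := by
  intro size _
  unfold Spec_macro_square_matrix
  exact pv_main size
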